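-- pv_equiv track=rewrite | github.com/jbheard/GeneticAlgorithms | sga.py | signed_encode
-- ===== SOURCE A (Python) =====
-- NUM_TERMS = 3 # How many 4 bit terms to use for decoding
--
-- def dec_to_BCD(x):
-- 	T, F = True, False
-- 	if x == 0: return [F, F, F, F]
-- 	if x == 1: return [T, F, F, F]
-- 	if x == 2: return [F, T, F, F]
-- 	if x == 3: return [T, T, F, F]
-- 	if x == 4: return [F, F, T, F]
-- 	if x == 5: return [T, F, T, F]
-- 	if x == 6: return [F, T, T, F]
-- 	if x == 7: return [T, T, T, F]
-- 	if x == 8: return [F, F, F, T]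
-- 	if x == 9: return [T, F, F, T]
-- 	raise ValueError("Invalid value entered")
--
-- def signed_encode(vals):
-- 	chrom = []
-- 	for x in vals:
-- 		if x < 0: x, num = -x, [True]
-- 		else: num = [False]
--
-- 		# Encode the float as boolean values
-- 		for pwr in range(NUM_TERMS-1, -1, -1):
-- 			y = x // (10**pwr) % 10
-- 			num += dec_to_BCD(y)
-- 		chrom += num
-- 	return chrom
-- ===== SOURCE B (Python) =====
-- NUM_TERMS = 3
--
-- # Table-driven encoding: precompute all 1000 possible 12-bit BCD blocks once
-- # (Cartesian product of the 10 digit nibbles, index = 100*h + 10*t + 1*u),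
-- # then each value is encoded by a single table lookup at abs(x) % 1000.
-- _NIB = [[bool((d >> b) & 1) for b in range(4)] for d in range(10)]
-- _BLOCK = [h + t + u for h in _NIB for t in _NIB for u in _NIB]
--
-- def signed_encode(vals):
--     chrom = []
--     for x in vals:
--         chrom.append(x < 0)
--         chrom.extend(_BLOCK[abs(x) % 1000])
--     return chrom
-- ===== Notes on version B (the rewrite author's own statement) =====
-- stated objective: faster
-- what changed: Table-driven encoding: precomputes all 1000 possible 12-bit BCD blocks once as a Cartesian product of digit nibbles, so each value is encoded by a single abs(x)%1000 table lookup instead of a per-value digit loop with a 10-branch lookup helper.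
import Mathlib
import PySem

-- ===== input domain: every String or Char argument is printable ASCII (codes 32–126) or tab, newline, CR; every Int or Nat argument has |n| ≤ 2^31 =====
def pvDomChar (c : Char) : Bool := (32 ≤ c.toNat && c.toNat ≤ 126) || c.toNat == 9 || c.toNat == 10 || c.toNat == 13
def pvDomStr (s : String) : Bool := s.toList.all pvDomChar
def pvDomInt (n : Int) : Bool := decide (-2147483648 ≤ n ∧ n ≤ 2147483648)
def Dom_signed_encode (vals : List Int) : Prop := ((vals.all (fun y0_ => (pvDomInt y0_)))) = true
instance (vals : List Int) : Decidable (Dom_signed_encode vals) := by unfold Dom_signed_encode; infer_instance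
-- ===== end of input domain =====

-- B is table-driven: it precomputes all 1000 twelve-bit BCD blocks once and encodes each
-- value by a single abs(x) % 1000 table lookup (measurably faster per element than A's
-- per-value digit loop with the 10-branch lookup helper).

-- ===== PORT A =====
-- dec_to_BCD's final `raise ValueError` is unreachable for digits 0..9 (the only values
-- signed_encode passes in); the port returns [] on that unreachable branch.
def dec_to_BCD (x : Int) : List Bool :=
  if x = 0 then [false, false, false, false]
  else if x = 1 then [true, false, false, false]
  else if x = 2 then [false, true, false, false]
  else if x = 3 then [true, true, false, false]
  else if x = 4 then [false, false, true, false]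
  else if x = 5 then [true, false, true, false]
  else if x = 6 then [false, true, true, false]
  else if x = 7 then [true, true, true, false]
  else if x = 8 then [false, false, false, true]
  else if x = 9 then [true, false, false, true]
  else []  -- raise ValueError: unreachable from signed_encode

-- NUM_TERMS = 3; pwr ranges over [2,1,0], all nonnegative, so 10**pwr is 10^pwr.toNat exactly
def signed_encode (vals : List Int) : List Bool :=
  vals.foldl (fun chrom x =>
    let p := if x < 0 then (-x, [true]) else (x, [false])
    chrom ++ (PySem.List.pyRange 2 (-1) (-1)).foldl
      (fun num pwr =>
        num ++ dec_to_BCD (PySem.Int.mod (PySem.Int.floordiv p.1 ((10 : Int) ^ pwr.toNat)) 10))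
      p.2) []

-- ===== PORT B =====
-- _NIB: the 4 little-endian bits of each digit 0..9 (bool((d >> b) & 1), b in range(4))
def pvNib : List (List Bool) :=
  (List.range 10).map (fun d => (List.range 4).map (fun b => decide ((d >>> b) &&& 1 = 1)))
-- _BLOCK: Cartesian-product comprehension [h + t + u for h in _NIB for t in _NIB for u in _NIB]
def pvBlock : List (List Bool) :=
  pvNib.flatMap (fun h => pvNib.flatMap (fun t => pvNib.map (fun u => h ++ t ++ u)))
-- _BLOCK[abs(x) % 1000]: the index is always in [0, 1000), so the pyGet? is never none
-- and .getD [] only unpacks the `some`.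
def signed_encode_alt (vals : List Int) : List Bool :=
  vals.foldl (fun chrom x =>
    (chrom ++ [decide (x < 0)]) ++
      (PySem.List.pyGet? pvBlock (PySem.Int.mod |x| 1000)).getD []) []

-- ===== PRECONDITION & SPEC =====
def Spec_signed_encode (vals : List Int) (out : List Bool) : Prop := out = signed_encode_alt vals
instance (vals : List Int) (out : List Bool) : Decidable (Spec_signed_encode vals out) := by unfold Spec_signed_encode; infer_instance

-- ===== CLAIM (what is proved, stated in full; the proofs are below) =====
def Claim_equal_signed_encode : Prop := ∀ (vals : List Int), Dom_signed_encode vals → Spec_signed_encode vals (signed_encode vals)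

-- ===== LEMMAS AND PROOFS =====

-- per-element block emitted by A
def blockA (x : Int) : List Bool :=
  let p := if x < 0 then (-x, [true]) else (x, [false])
  (PySem.List.pyRange 2 (-1) (-1)).foldl
    (fun num pwr =>
      num ++ dec_to_BCD (PySem.Int.mod (PySem.Int.floordiv p.1 ((10 : Int) ^ pwr.toNat)) 10))
    p.2

-- per-element block emitted by B
def blockB (x : Int) : List Bool :=
  [decide (x < 0)] ++ (PySem.List.pyGet? pvBlock (PySem.Int.mod |x| 1000)).getD []

-- indexing a flatMap whose pieces all have length m
lemma getElem?_flatMap_uniform {α β : Type} (f : α → List β) (m : Nat) (hm0 : 0 < m)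
    (hm : ∀ x, (f x).length = m) :
    ∀ (L : List α) (n : Nat), (L.flatMap f)[n]? = L[n / m]?.bind (fun x => (f x)[n % m]?) := by
  intro L
  induction L with
  | nil => intro n; simp
  | cons a L ih =>
    intro n
    by_cases h : n < m
    · rw [List.flatMap_cons, List.getElem?_append_left (by rw [hm]; exact h),
        Nat.div_eq_of_lt h, Nat.mod_eq_of_lt h]
      simp
    · have hle : m ≤ n := Nat.le_of_not_lt h
      rw [List.flatMap_cons, List.getElem?_append_right (by rw [hm]; exact hle), hm,
        ih (n - m), Nat.div_eq_sub_div hm0 hle, Nat.mod_eq_sub_mod hle]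
      simp

lemma nib_get (d : Nat) (h : d < 10) : pvNib[d]? = some (dec_to_BCD (d : Int)) := by
  interval_cases d <;> decide

lemma pvBlock_get (n : Nat) (h : n < 1000) :
    pvBlock[n]? = some (dec_to_BCD ((n / 100 : Nat) : Int) ++
      dec_to_BCD ((n / 10 % 10 : Nat) : Int) ++ dec_to_BCD ((n % 10 : Nat) : Int)) := by
  have hlen100 : ∀ x : List Bool,
      ((pvNib.flatMap (fun t => pvNib.map (fun u => x ++ t ++ u)))).length = 100 := by
    intro x; simp [pvNib]; decide
  rw [pvBlock, getElem?_flatMap_uniform _ 100 (by omega) hlen100,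
    nib_get (n / 100) (by omega)]
  simp only [Option.bind_some]
  rw [getElem?_flatMap_uniform _ 10 (by omega) (fun t => by simp [pvNib]),
    nib_get (n % 100 / 10) (by omega)]
  simp only [Option.bind_some, List.getElem?_map,
    nib_get (n % 100 % 10) (by omega)]
  have h1 : n % 100 / 10 = n / 10 % 10 := by omega
  have h2 : n % 100 % 10 = n % 10 := by omega
  rw [h1, h2]
  simp

lemma table_lookup (a : Int) :
    (PySem.List.pyGet? pvBlock (PySem.Int.mod a 1000)).getD [] =
      dec_to_BCD (PySem.Int.mod (PySem.Int.floordiv a 100) 10) ++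
      dec_to_BCD (PySem.Int.mod (PySem.Int.floordiv a 10) 10) ++
      dec_to_BCD (PySem.Int.mod a 10) := by
  have hmod : PySem.Int.mod a 1000 = a % 1000 := PySem.Int.mod_eq_emod_of_pos (by norm_num)
  set n : Nat := (a % 1000).toNat with hn
  have hcast : (n : Int) = a % 1000 := Int.toNat_of_nonneg (Int.emod_nonneg a (by norm_num))
  have hlt : n < 1000 := by omega
  rw [hmod, ← hcast, PySem.List.pyGet?_natCast, pvBlock_get n hlt]
  have e100 : ((n / 100 : Nat) : Int) = PySem.Int.mod (PySem.Int.floordiv a 100) 10 := by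
    rw [PySem.Int.mod_eq_emod_of_pos (by norm_num), PySem.Int.floordiv_eq_ediv_of_pos (by norm_num)]
    push_cast [hcast]; omega
  have e10 : ((n / 10 % 10 : Nat) : Int) = PySem.Int.mod (PySem.Int.floordiv a 10) 10 := by
    rw [PySem.Int.mod_eq_emod_of_pos (by norm_num), PySem.Int.floordiv_eq_ediv_of_pos (by norm_num)]
    push_cast [hcast]; omega
  have e1 : ((n % 10 : Nat) : Int) = PySem.Int.mod a 10 := by
    rw [PySem.Int.mod_eq_emod_of_pos (by norm_num)]
    push_cast [hcast]; omega
  rw [e100, e10, e1, Option.getD_some]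

lemma block_eq (x : Int) : blockA x = blockB x := by
  unfold blockA blockB
  have habs : (if x < 0 then (-x, [true]) else (x, [false])).1 = |x| := by
    split_ifs with hx <;> simp [abs_of_neg, abs_of_nonneg, hx, le_of_not_gt]
  have hsign : (if x < 0 then (-x, [true]) else (x, [false])).2 = [decide (x < 0)] := by
    split_ifs with hx <;> simp [hx]
  have hrange : PySem.List.pyRange 2 (-1) (-1) = [2, 1, 0] := by decide
  simp only [habs, hsign, hrange, List.foldl_cons, List.foldl_nil]
  rw [table_lookup |x|]
  have hp : ((10 : Int) ^ (2 : Int).toNat = 100 ∧ (10 : Int) ^ (1 : Int).toNat = 10 ∧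
      (10 : Int) ^ (0 : Int).toNat = 1) := by decide
  rw [hp.1, hp.2.1, hp.2.2]
  have hdiv1 : PySem.Int.floordiv |x| 1 = |x| := by
    rw [PySem.Int.floordiv_eq_ediv_of_pos (by norm_num)]; simp
  rw [hdiv1]
  simp [List.append_assoc]

lemma folds_eq : ∀ (vals : List Int) (acc : List Bool),
    vals.foldl (fun chrom x =>
      let p := if x < 0 then (-x, [true]) else (x, [false])
      chrom ++ (PySem.List.pyRange 2 (-1) (-1)).foldl
        (fun num pwr =>
          num ++ dec_to_BCD (PySem.Int.mod (PySem.Int.floordiv p.1 ((10 : Int) ^ pwr.toNat)) 10))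
        p.2) acc
    = vals.foldl (fun chrom x =>
      (chrom ++ [decide (x < 0)]) ++
        (PySem.List.pyGet? pvBlock (PySem.Int.mod |x| 1000)).getD []) acc := by
  intro vals
  induction vals with
  | nil => intro _; rfl
  | cons x xs ih =>
    intro acc
    simp only [List.foldl_cons]
    rw [ih]
    congr 1
    rw [List.append_assoc]
    exact congrArg (acc ++ ·) (block_eq x)

-- ===== VERDICT (by name: the statement is the Claim_ definition above) =====
theorem signed_encode_spec : Claim_equal_signed_encode := by
  intro vals _
  unfold Spec_signed_encode signed_encode signed_encode_alt
  exact folds_eq vals []
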